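-- pv_equiv track=rewrite | github.com/ACNLPlab/UMR-Text-Gen | amrbart-reformat.py | format_amr
-- ===== SOURCE A (Python) =====
-- def format_amr(amr_str):
--     pointer_count = 0
--     result = ""
--     i = 0
--     while i < len(amr_str):
--         if amr_str[i] == '(':
--             result += '('
--             i += 1
--             while i < len(amr_str) and amr_str[i] != '/' and amr_str[i] != ')':
--                 i += 1
--         elif amr_str[i] == '/':
--             i += 1
--             start = i
--             while i < len(amr_str) and amr_str[i] not in '( ':
--                 i += 1
--             result += f" <pointer:{pointer_count}>{amr_str[start:i].strip()} "
--             pointer_count += 1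
--         elif amr_str[i] == ')':
--             if result and result[-1] != ' ':
--                 result += ' '
--             result += ')'
--             i += 1
--         else:
--             result += amr_str[i]
--             i += 1
--     return result
-- ===== SOURCE B (Python) =====
-- def format_amr(amr_str):
--     # Pass 1: drop variable names, i.e. everything after a '(' up to the next '/' or ')'.
--     kept = []
--     skipping = False
--     for c in amr_str:
--         if skipping:
--             if c == '/' or c == ')':
--                 skipping = False
--                 kept.append(c)
--         else:
--             kept.append(c)
--             if c == '(':
--                 skipping = True
--     # Pass 2: turn each '/name' into an atomic pointer-token chunk, numbering left to right.
--     chunks = []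
--     count = 0
--     i = 0
--     while i < len(kept):
--         c = kept[i]
--         if c == '/':
--             j = i + 1
--             while j < len(kept) and kept[j] != '(' and kept[j] != ' ':
--                 j += 1
--             name = ''.join(kept[i + 1:j]).strip()
--             chunks.append(f" <pointer:{count}>{name} ")
--             count += 1
--             i = j
--         else:
--             chunks.append(c)
--             i += 1
--     # Pass 3: glue the chunks, inserting a space before each ')' chunk not preceded by a space.
--     out = []
--     for ch in chunks:
--         if ch == ')' and out and out[-1][-1] != ' ':
--             out.append(' ')
--         out.append(ch)
--     return ''.join(out)
-- ===== Notes on version B (the rewrite author's own statement) =====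
-- stated objective: alternative
-- what changed: Replaces A's single-pass index state machine (interleaved skipping, pointer numbering and spacing) by a three-stage pipeline - strip variable names, turn each concept into a numbered pointer-token chunk, then glue chunks fixing the closing-bracket spacing - built with list accumulation and join instead of repeated string concatenation.
import Mathlib
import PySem

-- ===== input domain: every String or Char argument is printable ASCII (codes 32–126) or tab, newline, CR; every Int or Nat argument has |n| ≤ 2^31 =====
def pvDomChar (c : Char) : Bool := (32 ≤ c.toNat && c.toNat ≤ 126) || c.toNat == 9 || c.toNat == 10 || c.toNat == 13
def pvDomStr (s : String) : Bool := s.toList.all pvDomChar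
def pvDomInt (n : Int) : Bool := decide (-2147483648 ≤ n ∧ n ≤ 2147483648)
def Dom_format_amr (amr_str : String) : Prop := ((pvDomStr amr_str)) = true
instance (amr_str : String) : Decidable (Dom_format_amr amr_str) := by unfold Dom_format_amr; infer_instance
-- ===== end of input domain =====

-- B replaces A's one-pass index state machine by a three-stage pipeline (strip variable
-- names, then number the concepts, then fix ')' spacing); objective: idiomatic/alternative.

-- ===== PORT A =====

-- inner while of the '(' branch: skip until '/' or ')'
def fmtSkipVar : List Char → List Char
  | [] => []
  | c :: cs => if c = '/' ∨ c = ')' then c :: cs else fmtSkipVar cs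

theorem fmtSkipVar_length : ∀ cs : List Char, (fmtSkipVar cs).length ≤ cs.length := by
  intro cs
  induction cs with
  | nil => simp [fmtSkipVar]
  | cons c cs ih =>
    simp only [fmtSkipVar]
    split
    · simp
    · exact Nat.le_succ_of_le ih

-- the main while loop of A (i advances, so recursion on the remaining characters)
def fmtGoA : List Char → Nat → List Char → List Char
  | [], _, res => res
  | c :: rest, n, res =>
    if c = '(' then
      fmtGoA (fmtSkipVar rest) n (res ++ ['('])
    else if c = '/' then
      fmtGoA (rest.dropWhile (fun d => ¬(d = '(' ∨ d = ' ')))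
        (n + 1)
        (res ++ (" <pointer:" ++ toString n ++ ">").toList
             ++ PySem.Chars.strip (rest.takeWhile (fun d => ¬(d = '(' ∨ d = ' ')))
             ++ [' '])
    else if c = ')' then
      fmtGoA rest n
        (res ++ (if res ≠ [] ∧ res.getLast? ≠ some ' ' then [' ', ')'] else [')']))
    else
      fmtGoA rest n (res ++ [c])
  termination_by cs _ _ => cs.length
  decreasing_by
    · exact Nat.lt_succ_of_le (fmtSkipVar_length rest)
    · exact Nat.lt_succ_of_le (List.length_dropWhile_le _ _)
    · simp
    · simp

def format_amr (amr_str : String) : String :=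
  String.mk (fmtGoA amr_str.toList 0 [])

-- ===== PORT B =====

-- pass 1: drop variable names (everything after '(' up to the next '/' or ')')
def fmtPass1 : Bool → List Char → List Char
  | _, [] => []
  | true, c :: cs => if c = '/' ∨ c = ')' then c :: fmtPass1 false cs else fmtPass1 true cs
  | false, c :: cs => c :: fmtPass1 (c = '(') cs

-- pass 2: each '/name' becomes one atomic pointer-token chunk, numbered left to right
def fmtPass2 : List Char → Nat → List (List Char)
  | [], _ => []
  | c :: cs, n =>
    if c = '/' then
      ((" <pointer:" ++ toString n ++ ">").toList
        ++ PySem.Chars.strip (cs.takeWhile (fun d => ¬(d = '(' ∨ d = ' ')))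
        ++ [' '])
      :: fmtPass2 (cs.dropWhile (fun d => ¬(d = '(' ∨ d = ' '))) (n + 1)
    else
      [c] :: fmtPass2 cs n
  termination_by cs _ => cs.length
  decreasing_by
    · exact Nat.lt_succ_of_le (List.length_dropWhile_le _ _)
    · simp

-- pass 3: glue the chunks, inserting a space before each ')' chunk not preceded by one
def fmtPass3 : List (List Char) → List Char → List Char
  | [], acc => acc
  | ch :: chs, acc =>
    fmtPass3 chs
      (acc ++ (if ch = [')'] ∧ acc ≠ [] ∧ acc.getLast? ≠ some ' ' then ' ' :: ch else ch))

def format_amr_alt (amr_str : String) : String :=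
  String.mk (fmtPass3 (fmtPass2 (fmtPass1 false amr_str.toList) 0) [])

-- ===== PRECONDITION & SPEC =====
def Spec_format_amr (amr_str : String) (out : String) : Prop := out = format_amr_alt amr_str
instance (amr_str : String) (out : String) : Decidable (Spec_format_amr amr_str out) := by unfold Spec_format_amr; infer_instance

-- ===== CLAIM (what is proved, stated in full; the proofs are below) =====
def Claim_equal_format_amr : Prop := ∀ (amr_str : String), Dom_format_amr amr_str → Spec_format_amr amr_str (format_amr amr_str)

-- ===== LEMMAS AND PROOFS =====

-- pass1 in skipping state = pass1 after A's variable skip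
theorem fmtPass1_true (cs : List Char) :
    fmtPass1 true cs = fmtPass1 false (fmtSkipVar cs) := by
  induction cs with
  | nil => rfl
  | cons c cs ih =>
    by_cases h : c = '/' ∨ c = ')'
    · have hne : ¬ c = '(' := by rcases h with h | h <;> simp [h]
      simp [fmtPass1, fmtSkipVar, h, hne]
    · simp [fmtPass1, fmtSkipVar, h, ih]

-- pass1 (not skipping) commutes with the name scan of pass 2 / of A's '/' branch
theorem fmtPass1_takeWhile (cs : List Char) :
    (fmtPass1 false cs).takeWhile (fun d => ¬(d = '(' ∨ d = ' '))
      = cs.takeWhile (fun d => ¬(d = '(' ∨ d = ' ')) := by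
  induction cs with
  | nil => rfl
  | cons c cs ih =>
    by_cases h : c = '(' ∨ c = ' '
    · rcases h with h | h <;> simp [fmtPass1, List.takeWhile, h]
    · have hne : ¬ c = '(' := fun hc => h (Or.inl hc)
      have hs : ¬ c = ' ' := fun hc => h (Or.inr hc)
      simpa [fmtPass1, List.takeWhile, hne, hs] using ih

theorem fmtPass1_dropWhile (cs : List Char) :
    (fmtPass1 false cs).dropWhile (fun d => ¬(d = '(' ∨ d = ' '))
      = fmtPass1 false (cs.dropWhile (fun d => ¬(d = '(' ∨ d = ' '))) := by
  induction cs with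
  | nil => rfl
  | cons c cs ih =>
    by_cases h : c = '(' ∨ c = ' '
    · rcases h with h | h <;> simp [fmtPass1, List.dropWhile, h]
    · have hne : ¬ c = '(' := fun hc => h (Or.inl hc)
      have hs : ¬ c = ' ' := fun hc => h (Or.inr hc)
      simpa [fmtPass1, List.dropWhile, hne, hs] using ih

-- a chunk that is not exactly [')'] is appended verbatim by pass 3
theorem fmtPass3_cons_ne (ch : List Char) (chs : List (List Char)) (acc : List Char)
    (h : ch ≠ [')']) :
    fmtPass3 (ch :: chs) acc = fmtPass3 chs (acc ++ ch) := by
  simp [fmtPass3, h]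

-- main invariant: A's interleaved loop equals the staged pipeline from any state
theorem fmtGoA_eq_pipeline (cs : List Char) (n : Nat) (res : List Char) :
    fmtGoA cs n res = fmtPass3 (fmtPass2 (fmtPass1 false cs) n) res := by
  induction hlen : cs.length using Nat.strong_induction_on generalizing cs n res with
  | _ len ih =>
  match cs with
  | [] => simp [fmtGoA, fmtPass1, fmtPass2, fmtPass3]
  | c :: rest =>
    subst hlen
    by_cases hpar : c = '('
    · subst hpar
      have h1 : fmtPass1 false ('(' :: rest) = '(' :: fmtPass1 false (fmtSkipVar rest) := by
        simp [fmtPass1, fmtPass1_true]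
      rw [show fmtGoA ('(' :: rest) n res = fmtGoA (fmtSkipVar rest) n (res ++ ['(']) from by
        simp [fmtGoA], h1]
      rw [show fmtPass2 ('(' :: fmtPass1 false (fmtSkipVar rest)) n
            = ['('] :: fmtPass2 (fmtPass1 false (fmtSkipVar rest)) n from by
        simp [fmtPass2]]
      rw [fmtPass3_cons_ne _ _ _ (by decide)]
      exact ih (fmtSkipVar rest).length
        (Nat.lt_succ_of_le (fmtSkipVar_length rest)) _ n _ rfl
    · by_cases hsl : c = '/'
      · subst hsl
        have h1 : fmtPass1 false ('/' :: rest) = '/' :: fmtPass1 false rest := by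
          simp [fmtPass1]
        rw [show fmtGoA ('/' :: rest) n res
              = fmtGoA (rest.dropWhile (fun d => ¬(d = '(' ∨ d = ' '))) (n + 1)
                  (res ++ (" <pointer:" ++ toString n ++ ">").toList
                    ++ PySem.Chars.strip (rest.takeWhile (fun d => ¬(d = '(' ∨ d = ' ')))
                    ++ [' ']) from by simp [fmtGoA], h1]
        rw [show fmtPass2 ('/' :: fmtPass1 false rest) n
              = ((" <pointer:" ++ toString n ++ ">").toList
                  ++ PySem.Chars.strip ((fmtPass1 false rest).takeWhile
                      (fun d => ¬(d = '(' ∨ d = ' ')))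
                  ++ [' '])
                :: fmtPass2 ((fmtPass1 false rest).dropWhile
                    (fun d => ¬(d = '(' ∨ d = ' '))) (n + 1) from by simp [fmtPass2]]
        rw [fmtPass1_takeWhile, fmtPass1_dropWhile]
        rw [fmtPass3_cons_ne _ _ _ (by
          intro hEq
          have h2 := congrArg List.head? hEq
          simp at h2)]
        rw [← List.append_assoc, ← List.append_assoc]
        exact ih (rest.dropWhile (fun d => ¬(d = '(' ∨ d = ' '))).length
          (Nat.lt_succ_of_le (List.length_dropWhile_le _ _)) _ (n + 1) _ rfl
      · by_cases hr : c = ')'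
        · subst hr
          have h1 : fmtPass1 false (')' :: rest) = ')' :: fmtPass1 false rest := by
            simp [fmtPass1]
          rw [show fmtGoA (')' :: rest) n res
                = fmtGoA rest n
                    (res ++ (if res ≠ [] ∧ res.getLast? ≠ some ' '
                      then [' ', ')'] else [')'])) from by simp [fmtGoA], h1]
          rw [show fmtPass2 (')' :: fmtPass1 false rest) n
                = [')'] :: fmtPass2 (fmtPass1 false rest) n from by simp [fmtPass2]]
          rw [show fmtPass3 ([')'] :: fmtPass2 (fmtPass1 false rest) n) res
                = fmtPass3 (fmtPass2 (fmtPass1 false rest) n)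
                    (res ++ (if res ≠ [] ∧ res.getLast? ≠ some ' '
                      then [' ', ')'] else [')'])) from by
            by_cases hc : res ≠ [] ∧ res.getLast? ≠ some ' ' <;> simp [fmtPass3, hc]]
          exact ih rest.length (Nat.lt_succ_self _) _ n _ rfl
        · have h1 : fmtPass1 false (c :: rest) = c :: fmtPass1 false rest := by
            simp [fmtPass1, hpar]
          rw [show fmtGoA (c :: rest) n res = fmtGoA rest n (res ++ [c]) from by
            simp [fmtGoA, hpar, hsl, hr], h1]
          rw [show fmtPass2 (c :: fmtPass1 false rest) n
                = [c] :: fmtPass2 (fmtPass1 false rest) n from by simp [fmtPass2, hsl]]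
          rw [fmtPass3_cons_ne _ _ _ (by simp [hr])]
          exact ih rest.length (Nat.lt_succ_self _) _ n _ rfl

-- ===== VERDICT (by name: the statement is the Claim_ definition above) =====
theorem format_amr_spec : Claim_equal_format_amr := by
  intro s _
  unfold Spec_format_amr format_amr format_amr_alt
  rw [fmtGoA_eq_pipeline]
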